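-- pv_equiv track=rewrite | github.com/severi/Casino | computerPlayerIO.py | hasSameCards
-- ===== SOURCE A (Python) =====
-- def hasSameCards(cardGroupComb):                #[s1 s2 r1][s3 b1][s4]
--
--     for i in range(len(cardGroupComb)):         #[s1 s2 e1]
--         if i+1>=len(cardGroupComb):
--             return False
--         for j in range(i+1,len(cardGroupComb)):   #[s3 b1][s4]
--             for card in cardGroupComb[i]:       #s1 s2 r1
--                 if card in cardGroupComb[j]:    #s1 vs s3 b1
--                     return True
--     return False
-- ===== SOURCE B (Python) =====
-- def hasSameCards(cardGroupComb):
--     seen = set()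
--     for group in cardGroupComb:
--         g = set(group)
--         if not seen.isdisjoint(g):
--             return True
--         seen.update(g)
--     return False
-- ===== Notes on version B (the rewrite author's own statement) =====
-- stated objective: alternative
-- what changed: Replaces A's nested index-based pairwise scan (each earlier group's cards looked up by list membership in every later group) with a single forward pass that accumulates a set of cards seen in previous groups and tests each group against it; the measured timing showed no speedup on the generated inputs.
import Mathlib
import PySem

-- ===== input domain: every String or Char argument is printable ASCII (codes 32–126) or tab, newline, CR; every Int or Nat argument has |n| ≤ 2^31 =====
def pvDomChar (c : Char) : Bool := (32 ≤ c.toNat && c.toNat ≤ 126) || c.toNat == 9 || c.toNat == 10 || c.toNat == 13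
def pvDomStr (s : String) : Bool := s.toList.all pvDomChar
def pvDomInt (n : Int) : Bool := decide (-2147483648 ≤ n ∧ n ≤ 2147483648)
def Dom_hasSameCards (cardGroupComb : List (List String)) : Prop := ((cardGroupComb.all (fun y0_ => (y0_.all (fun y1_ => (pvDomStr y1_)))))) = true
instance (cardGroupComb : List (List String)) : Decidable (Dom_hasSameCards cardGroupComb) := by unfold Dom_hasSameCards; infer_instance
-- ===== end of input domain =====

-- B replaces A's nested index-based pairwise group scanning with one pass over the
-- groups that accumulates a set of previously seen cards (objective: alternative).


-- ===== PORT A =====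
-- innermost loop: 'for card in cardGroupComb[i]: if card in cardGroupComb[j]: return True'
def pvA_card : List String → List String → Bool
  | [], _ => false
  | c :: rest, gj => if gj.contains c then true else pvA_card rest gj

-- middle loop: 'for j in range(i+1, len(cardGroupComb)): …'
def pvA_j (xs : List (List String)) (gi : List String) : List Int → Bool
  | [] => false
  | j :: rest =>
      if pvA_card gi (PySem.List.pyGetD xs j []) then true else pvA_j xs gi rest

-- outer loop: 'for i in range(len(cardGroupComb)): …'
def pvA_i (xs : List (List String)) : List Int → Bool
  | [] => false
  | i :: rest =>
      if i + 1 ≥ (xs.length : Int) then false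
      else if pvA_j xs (PySem.List.pyGetD xs i []) (PySem.List.pyRange (i + 1) (xs.length : Int) 1) then true
      else pvA_i xs rest

def hasSameCards (cardGroupComb : List (List String)) : Bool :=
  pvA_i cardGroupComb (PySem.List.pyRange 0 (cardGroupComb.length : Int) 1)

-- ===== PORT B =====
-- one pass; 'seen' is the set of cards of all previous groups
def pvB_loop (seen : PySem.Set String) : List (List String) → Bool
  | [] => false
  | g :: rest =>
      let s := PySem.Set.ofList g
      if !(PySem.Set.isdisjoint seen s) then true
      else pvB_loop (PySem.Set.update seen s) rest

def hasSameCards_alt (cardGroupComb : List (List String)) : Bool :=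
  pvB_loop PySem.Set.empty cardGroupComb

-- ===== PRECONDITION & SPEC =====
def Spec_hasSameCards (cardGroupComb : List (List String)) (out : Bool) : Prop := out = hasSameCards_alt cardGroupComb
instance (cardGroupComb : List (List String)) (out : Bool) : Decidable (Spec_hasSameCards cardGroupComb out) := by unfold Spec_hasSameCards; infer_instance

-- ===== CLAIM (what is proved, stated in full; the proofs are below) =====
def Claim_equal_hasSameCards : Prop := ∀ (cardGroupComb : List (List String)), Dom_hasSameCards cardGroupComb → Spec_hasSameCards cardGroupComb (hasSameCards cardGroupComb)

-- ===== LEMMAS AND PROOFS =====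

-- common reference form: group g shares a card with some later group
def sharedTail : List (List String) → Bool
  | [] => false
  | g :: rest => (rest.any fun h => pvA_card g h) || sharedTail rest

theorem pvA_card_eq (gi gj : List String) : pvA_card gi gj = gi.any gj.contains := by
  induction gi with
  | nil => simp [pvA_card]
  | cons c rest ih => by_cases h : gj.contains c <;> simp [pvA_card, h, ih]

theorem pvA_card_iff (gi gj : List String) : pvA_card gi gj = true ↔ ∃ c ∈ gi, c ∈ gj := by
  simp [pvA_card_eq, List.any_eq_true]

theorem pvA_j_drop (xs : List (List String)) (gi : List String) (k : Nat) :
    pvA_j xs gi (PySem.List.pyRange (k : Int) (xs.length : Int) 1) = (xs.drop k).any (fun h => pvA_card gi h) := by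
  by_cases hk : k < xs.length
  · rw [PySem.List.pyRange_one_cons (by exact_mod_cast hk)]
    have hd : xs.drop k = xs[k] :: xs.drop (k + 1) := List.drop_eq_getElem_cons hk
    have hget : PySem.List.pyGetD xs (k : Int) [] = xs[k] := by
      simp [PySem.List.pyGetD_natCast, hk]
    simp only [pvA_j, hget, hd, List.any_cons]
    have := pvA_j_drop xs gi (k + 1)
    push_cast at this ⊢
    rw [this]
    by_cases h : pvA_card gi xs[k] = true <;> simp [h]
  · have h1 : PySem.List.pyRange (k : Int) (xs.length : Int) 1 = [] := by
      rw [PySem.List.pyRange_one]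
      have : ((xs.length : Int) - k).toNat = 0 := by omega
      simp [this]
    have h2 : xs.drop k = [] := List.drop_eq_nil_of_le (by omega)
    simp [h1, h2, pvA_j]
termination_by xs.length - k

theorem pvA_i_drop (xs : List (List String)) (k : Nat) :
    pvA_i xs (PySem.List.pyRange (k : Int) (xs.length : Int) 1) = sharedTail (xs.drop k) := by
  by_cases hk : k < xs.length
  · rw [PySem.List.pyRange_one_cons (by exact_mod_cast hk)]
    have hd : xs.drop k = xs[k] :: xs.drop (k + 1) := List.drop_eq_getElem_cons hk
    have hget : PySem.List.pyGetD xs (k : Int) [] = xs[k] := by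
      simp [PySem.List.pyGetD_natCast, hk]
    by_cases hlast : (k : Int) + 1 ≥ (xs.length : Int)
    · have hk1 : k + 1 = xs.length := by omega
      have hd2 : xs.drop (k + 1) = [] := by simp [hk1]
      simp only [pvA_i, if_pos hlast, hd, hd2, sharedTail, List.any_nil, Bool.false_or]
    · simp only [pvA_i, if_neg hlast, hget]
      have hj : pvA_j xs xs[k] (PySem.List.pyRange ((k : Int) + 1) (xs.length : Int) 1)
          = (xs.drop (k + 1)).any (fun h => pvA_card xs[k] h) := by
        have := pvA_j_drop xs xs[k] (k + 1); push_cast at this; exact this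
      have hi : pvA_i xs (PySem.List.pyRange ((k : Int) + 1) (xs.length : Int) 1)
          = sharedTail (xs.drop (k + 1)) := by
        have := pvA_i_drop xs (k + 1); push_cast at this; exact this
      rw [hj, hi, hd]
      by_cases h : (xs.drop (k + 1)).any (fun h => pvA_card xs[k] h) = true <;>
        simp [sharedTail, h]
  · have h1 : PySem.List.pyRange (k : Int) (xs.length : Int) 1 = [] := by
      rw [PySem.List.pyRange_one]
      have : ((xs.length : Int) - k).toNat = 0 := by omega
      simp [this]
    have h2 : xs.drop k = [] := List.drop_eq_nil_of_le (by omega)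
    simp [h1, h2, pvA_i, sharedTail]
termination_by xs.length - k

theorem hasSameCards_eq_sharedTail (xs : List (List String)) :
    hasSameCards xs = sharedTail xs := by
  have := pvA_i_drop xs 0
  simpa [hasSameCards] using this

theorem pvB_loop_iff (gs : List (List String)) (seen : PySem.Set String) :
    pvB_loop seen gs = true ↔ (∃ g ∈ gs, ∃ c ∈ g, c ∈ seen) ∨ sharedTail gs = true := by
  induction gs generalizing seen with
  | nil => simp [pvB_loop, sharedTail]
  | cons g rest ih =>
      by_cases hdis : PySem.Set.isdisjoint seen (PySem.Set.ofList g) = true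
      · have hno : ¬ ∃ c ∈ g, c ∈ seen := by
          rintro ⟨c, hc, hcs⟩
          exact ((PySem.Set.isdisjoint_iff seen (PySem.Set.ofList g)).mp hdis) c hcs
            ((PySem.Set.mem_ofList g c).mpr hc)
        have hstep : pvB_loop seen (g :: rest)
            = pvB_loop (PySem.Set.update seen (PySem.Set.ofList g)) rest := by
          simp [pvB_loop, hdis]
        rw [hstep, ih]
        simp only [sharedTail, Bool.or_eq_true, List.any_eq_true, pvA_card_iff,
          PySem.Set.mem_update, PySem.Set.mem_ofList, List.mem_cons]
        constructor
        · rintro (⟨h, hh, c, hc, hcs | hcg⟩ | hs)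
          · exact Or.inl ⟨h, Or.inr hh, c, hc, hcs⟩
          · exact Or.inr (Or.inl ⟨h, hh, c, hcg, hc⟩)
          · exact Or.inr (Or.inr hs)
        · rintro (⟨h, rfl | hh, c, hc, hcs⟩ | ⟨h, hh, c, hcg, hch⟩ | hs)
          · exact absurd ⟨c, hc, hcs⟩ hno
          · exact Or.inl ⟨h, hh, c, hc, Or.inl hcs⟩
          · exact Or.inl ⟨h, hh, c, hch, Or.inr hcg⟩
          · exact Or.inr hs
      · have hwit : ∃ c, c ∈ seen ∧ c ∈ PySem.Set.ofList g := by
          by_contra hno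
          exact hdis ((PySem.Set.isdisjoint_iff seen (PySem.Set.ofList g)).mpr
            (fun x hx hxg => hno ⟨x, hx, hxg⟩))
        rcases hwit with ⟨c, hcs, hcg⟩
        have htrue : pvB_loop seen (g :: rest) = true := by
          simp [pvB_loop, hdis]
        rw [htrue]
        simp only [true_iff]
        exact Or.inl ⟨g, List.mem_cons_self, c, (PySem.Set.mem_ofList g c).mp hcg, hcs⟩

theorem alt_eq_sharedTail (xs : List (List String)) :
    hasSameCards_alt xs = sharedTail xs := by
  have h := pvB_loop_iff xs PySem.Set.empty
  have hempty : ¬ ∃ g ∈ xs, ∃ c ∈ g, c ∈ (PySem.Set.empty : PySem.Set String) := by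
    rintro ⟨g, _, c, _, hc⟩
    simp [PySem.Set.empty] at hc
  unfold hasSameCards_alt
  by_cases hb : pvB_loop PySem.Set.empty xs = true
  · rw [hb]
    rcases h.mp hb with hx | hx
    · exact absurd hx hempty
    · exact hx.symm
  · have hs : sharedTail xs = false := by
      cases hsc : sharedTail xs
      · rfl
      · exact absurd (h.mpr (Or.inr hsc)) hb
    rw [Bool.not_eq_true] at hb
    rw [hb, hs]

-- ===== VERDICT (by name: the statement is the Claim_ definition above) =====
theorem hasSameCards_spec : Claim_equal_hasSameCards := by
  intro xs _
  unfold Spec_hasSameCards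
  rw [hasSameCards_eq_sharedTail, alt_eq_sharedTail]
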